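-- pv_equiv track=rewrite | github.com/AnastasiiaYelchaninova/Python-NA-mexmat | Lagrange interpolation_Yelchaninova_en.py | Lagrange_value
-- ===== SOURCE A (Python) =====
-- def Lagrange_value(m, x, k):
--     s = 0
--     for i in range(len(m)):
--         p = 1
--         for j in range(len(m)):
--             if j == i:
--                 continue
--             else:
--                 p = p * (k - x[j])
--         s = s + m[i]*p
--     return s
-- ===== SOURCE B (Python) =====
-- def Lagrange_value(m, x, k):
--     n = len(m)
--     if n == 0:
--         return 0
--     # sufs[i] = product of (k - x[t]) for t in i+1 .. n-1
--     sufs = [1] * n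
--     for i in range(n - 2, -1, -1):
--         sufs[i] = (k - x[i + 1]) * sufs[i + 1]
--     s = 0
--     pre = 1
--     for i in range(n - 1):
--         s += m[i] * pre * sufs[i]
--         pre *= k - x[i]
--     return s + m[n - 1] * pre
-- ===== Notes on version B (the rewrite author's own statement) =====
-- stated objective: faster
-- what changed: Replaces the quadratic nested loop (recomputing the all-but-one product from scratch for each node) with a precomputed suffix-product array and a running prefix-product accumulator, so each all-but-i product is pre*sufs[i] in O(1).
import Mathlib
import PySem

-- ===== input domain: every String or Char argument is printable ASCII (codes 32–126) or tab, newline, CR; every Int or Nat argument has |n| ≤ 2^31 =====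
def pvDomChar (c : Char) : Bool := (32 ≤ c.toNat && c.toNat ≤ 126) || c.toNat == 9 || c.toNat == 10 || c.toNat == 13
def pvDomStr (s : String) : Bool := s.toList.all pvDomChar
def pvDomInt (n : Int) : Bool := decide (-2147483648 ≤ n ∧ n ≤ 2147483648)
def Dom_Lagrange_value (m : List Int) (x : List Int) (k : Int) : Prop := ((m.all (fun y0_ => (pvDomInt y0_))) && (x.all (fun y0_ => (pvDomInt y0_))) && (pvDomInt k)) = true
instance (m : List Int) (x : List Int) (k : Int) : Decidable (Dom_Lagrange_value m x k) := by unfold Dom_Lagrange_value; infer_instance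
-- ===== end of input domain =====

-- B replaces A's quadratic nested loops by a suffix-product array and a running prefix product:
-- each all-but-i product is pre * sufs[i], giving O(n) instead of O(n^2).

-- ===== PORT A =====
def Lagrange_value (m : List Int) (x : List Int) (k : Int) : Int :=
  (PySem.List.pyRange 0 (m.length : Int) 1).foldl
    (fun s i =>
      s + PySem.List.pyGetD m i 0 *
        ((PySem.List.pyRange 0 (m.length : Int) 1).foldl
          (fun p j => if j == i then p else p * (k - PySem.List.pyGetD x j 0)) 1))
    0

-- ===== PORT B =====
-- Source B's backward loop filling sufs: (pvSufProds d1)[i] = product of d1.drop i, last entry 1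
def pvSufProds : List Int → List Int
  | [] => [1]
  | a :: t => (a * (pvSufProds t).headD 1) :: pvSufProds t

-- Source B's forward loop over i in range(n-1): s += m[i]*pre*sufs[i]; pre *= (k-x[i]);
-- then the final `return s + m[n-1] * pre` is the singleton case (and [] is the n == 0 early return 0)
def pvAltLoop : List Int → List Int → List Int → Int → Int → Int
  | [], _, _, _, s => s
  | [mi], _, _, pre, s => s + mi * pre
  | mi :: mt, d0, suf, pre, s =>
      pvAltLoop mt d0.tail suf.tail (pre * d0.headD 1) (s + mi * pre * suf.headD 1)

def Lagrange_value_alt (m : List Int) (x : List Int) (k : Int) : Int :=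
  let sufs := pvSufProds ((PySem.List.pyRange 1 (m.length : Int) 1).map
    (fun j => k - PySem.List.pyGetD x j 0))
  pvAltLoop m
    ((PySem.List.pyRange 0 ((m.length : Int) - 1) 1).map (fun j => k - PySem.List.pyGetD x j 0))
    sufs 1 0

-- ===== PRECONDITION & SPEC =====
-- Pre_ excludes exactly the inputs on which Python A raises IndexError: len(x) < len(m) with
-- len(m) >= 2 (for len(m) <= 1 A reads no x entry and returns normally, and so does B).
-- B raises on exactly the same inputs, so nothing A returns on is excluded.
def Pre_Lagrange_value (m : List Int) (x : List Int) (k : Int) : Prop :=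
  m.length ≤ x.length ∨ m.length ≤ 1
instance (m : List Int) (x : List Int) (k : Int) : Decidable (Pre_Lagrange_value m x k) := by
  unfold Pre_Lagrange_value; infer_instance
def pvWitness_Lagrange_value : List Int × List Int × Int := ([1, 2], [3, 4], 5)

def Spec_Lagrange_value (m : List Int) (x : List Int) (k : Int) (out : Int) : Prop := out = Lagrange_value_alt m x k
instance (m : List Int) (x : List Int) (k : Int) (out : Int) : Decidable (Spec_Lagrange_value m x k out) := by unfold Spec_Lagrange_value; infer_instance

-- ===== CLAIM (what is proved, stated in full; the proofs are below) =====
def Claim_equal_Lagrange_value : Prop := ∀ (m : List Int) (x : List Int) (k : Int), Dom_Lagrange_value m x k → Pre_Lagrange_value m x k → Spec_Lagrange_value m x k (Lagrange_value m x k)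

-- ===== LEMMAS AND PROOFS =====

-- common recursive value: pvF m d = Σ_i m_i * Π_{j≠i} d_j
def pvF : List Int → List Int → Int
  | [], _ => 0
  | _ :: _, [] => 0
  | mi :: mt, di :: dt => mi * dt.prod + di * pvF mt dt

lemma pvSufProds_headD (d : List Int) : (pvSufProds d).headD 1 = d.prod := by
  induction d with
  | nil => simp [pvSufProds]
  | cons a t ih => simp only [pvSufProds, List.headD_cons, ih, List.prod_cons]

lemma pvAltLoop_eq : ∀ (m d : List Int), m.length = d.length → ∀ (pre s : Int),
    pvAltLoop m d.dropLast (pvSufProds d.tail) pre s = s + pre * pvF m d := by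
  intro m
  induction m with
  | nil => intro d _ pre s; simp [pvAltLoop, pvF]
  | cons mi mt ih =>
    intro d hlen pre s
    cases d with
    | nil => simp at hlen
    | cons di dt =>
      cases mt with
      | nil =>
        cases dt with
        | nil => simp [pvAltLoop, pvF]; ring
        | cons b u => simp at hlen
      | cons a t =>
        cases dt with
        | nil => simp at hlen
        | cons b u =>
          have hdrop : (di :: b :: u).dropLast = di :: (b :: u).dropLast := by
            simp [List.dropLast_cons_of_ne_nil]
          rw [hdrop]
          show pvAltLoop (a :: t) (di :: (b :: u).dropLast).tail
              ((pvSufProds (b :: u)).tail)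
              (pre * (di :: (b :: u).dropLast).headD 1)
              (s + mi * pre * (pvSufProds (b :: u)).headD 1)
            = s + pre * pvF (mi :: a :: t) (di :: b :: u)
          have hsuft : (pvSufProds (b :: u)).tail = pvSufProds u := by
            simp [pvSufProds]
          rw [hsuft, pvSufProds_headD, List.tail_cons, List.headD_cons]
          have : pvAltLoop (a :: t) ((b :: u).dropLast) (pvSufProds u) (pre * di)
              (s + mi * pre * (b :: u).prod)
              = (s + mi * pre * (b :: u).prod) + (pre * di) * pvF (a :: t) (b :: u) := by
            have := ih (b :: u) (by simpa using hlen) (pre * di) (s + mi * pre * (b :: u).prod)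
            simpa using this
          rw [this]
          show _ = s + pre * (mi * (b :: u).prod + di * pvF (a :: t) (b :: u))
          ring

-- A's inner loop: multiply-all-but-i is the product over the filtered index list
lemma pvFoldlSkip (f : Int → Int) (i : Int) : ∀ (L : List Int) (c : Int),
    L.foldl (fun p j => if j == i then p else p * f j) c
      = c * ((L.filter (fun j => !(j == i))).map f).prod := by
  intro L
  induction L with
  | nil => intro c; simp
  | cons a t ih =>
    intro c
    rw [List.foldl_cons, List.filter_cons]
    by_cases h : a = i
    · subst h
      simp only [beq_self_eq_true, if_true, Bool.not_true, Bool.false_eq_true, if_false]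
      exact ih c
    · have hb : (a == i) = false := beq_eq_false_iff_ne.mpr h
      simp only [hb, Bool.false_eq_true, if_false, Bool.not_false, if_true, List.map_cons,
        List.prod_cons]
      rw [ih]
      ring

-- the indexed sum of all-but-i products equals pvF
lemma pvSum_eq_pvF : ∀ (m d : List Int), m.length = d.length →
    ((List.range m.length).map
      (fun i => m.getD i 0 * ((d.take i).prod * (d.drop (i + 1)).prod))).sum = pvF m d := by
  intro m
  induction m with
  | nil => intro d h; simp [pvF]
  | cons mi mt ih =>
    intro d h
    cases d with
    | nil => simp at h
    | cons di dt =>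
      simp only [List.length_cons] at h
      have hcong : ∀ i ∈ List.range mt.length,
          ((fun i => (mi :: mt).getD i 0 * (((di :: dt).take i).prod * ((di :: dt).drop (i + 1)).prod)) ∘ Nat.succ) i
            = di * (mt.getD i 0 * ((dt.take i).prod * (dt.drop (i + 1)).prod)) := by
        intro i _
        simp [Function.comp, List.take_succ_cons, List.drop_succ_cons]
        ring
      rw [List.length_cons, List.range_succ_eq_map, List.map_cons, List.sum_cons, List.map_map,
        List.map_congr_left hcong, List.sum_map_mul_left, ih dt (by omega)]
      simp [pvF]

lemma Lagrange_value_eq_pvF (m x : List Int) (k : Int) :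
    Lagrange_value m x k
      = pvF m ((PySem.List.pyRange 0 (m.length : Int) 1).map (fun j => k - PySem.List.pyGetD x j 0)) := by
  have hdlen : ((PySem.List.pyRange 0 (m.length : Int) 1).map (fun j => k - PySem.List.pyGetD x j 0)).length = m.length := by
    simp [PySem.List.length_pyRange_one]
  set f : Int → Int := fun j => k - PySem.List.pyGetD x j 0 with hf
  set d := (PySem.List.pyRange 0 (m.length : Int) 1).map f with hd
  have hterm : ∀ i ∈ PySem.List.pyRange 0 (m.length : Int) 1,
      PySem.List.pyGetD m i 0 *
        ((PySem.List.pyRange 0 (m.length : Int) 1).foldl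
          (fun p j => if j == i then p else p * (k - PySem.List.pyGetD x j 0)) 1)
        = m.getD i.toNat 0 * ((d.take i.toNat).prod * (d.drop (i.toNat + 1)).prod) := by
    intro i hi
    obtain ⟨h0, hlt⟩ := (PySem.List.mem_pyRange_one).mp hi
    obtain ⟨iN, rfl⟩ : ∃ iN : Nat, i = (iN : Int) := ⟨i.toNat, (Int.toNat_of_nonneg h0).symm⟩
    have hsplit : PySem.List.pyRange 0 (m.length : Int) 1
        = PySem.List.pyRange 0 (iN : Int) 1 ++ ((iN : Int) :: PySem.List.pyRange ((iN : Int) + 1) (m.length : Int) 1) := by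
      rw [PySem.List.pyRange_one_append 0 (iN : Int) (m.length : Int) h0 (le_of_lt hlt),
        PySem.List.pyRange_one_cons hlt]
    have h1 : (PySem.List.pyRange 0 (iN : Int) 1).filter (fun j => !(j == (iN : Int))) = PySem.List.pyRange 0 (iN : Int) 1 := by
      apply List.filter_eq_self.mpr
      intro j hj
      have hm := (PySem.List.mem_pyRange_one).mp hj
      simp only [Bool.not_eq_eq_eq_not, Bool.not_true, beq_eq_false_iff_ne]
      omega
    have h2 : (PySem.List.pyRange ((iN : Int) + 1) (m.length : Int) 1).filter (fun j => !(j == (iN : Int)))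
        = PySem.List.pyRange ((iN : Int) + 1) (m.length : Int) 1 := by
      apply List.filter_eq_self.mpr
      intro j hj
      have hm := (PySem.List.mem_pyRange_one).mp hj
      simp only [Bool.not_eq_eq_eq_not, Bool.not_true, beq_eq_false_iff_ne]
      omega
    have hfilter : (PySem.List.pyRange 0 (m.length : Int) 1).filter (fun j => !(j == (iN : Int)))
        = PySem.List.pyRange 0 (iN : Int) 1 ++ PySem.List.pyRange ((iN : Int) + 1) (m.length : Int) 1 := by
      rw [hsplit, List.filter_append, List.filter_cons]
      simp [h1, h2]
    have hlen1 : ((PySem.List.pyRange 0 (iN : Int) 1).map f).length = iN := by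
      simp [PySem.List.length_pyRange_one]
    have hd2 : d = (PySem.List.pyRange 0 (iN : Int) 1).map f
        ++ (f (iN : Int) :: (PySem.List.pyRange ((iN : Int) + 1) (m.length : Int) 1).map f) := by
      rw [hd, hsplit, List.map_append, List.map_cons]
    have htake : d.take iN = (PySem.List.pyRange 0 (iN : Int) 1).map f := by
      rw [hd2, List.take_left' hlen1]
    have hdrop : d.drop (iN + 1) = (PySem.List.pyRange ((iN : Int) + 1) (m.length : Int) 1).map f := by
      rw [hd2,
        show (PySem.List.pyRange 0 (iN : Int) 1).map f
            ++ (f (iN : Int) :: (PySem.List.pyRange ((iN : Int) + 1) (m.length : Int) 1).map f)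
          = ((PySem.List.pyRange 0 (iN : Int) 1).map f ++ [f (iN : Int)])
            ++ (PySem.List.pyRange ((iN : Int) + 1) (m.length : Int) 1).map f from by simp]
      exact List.drop_left' (by simp [hlen1])
    rw [pvFoldlSkip f (iN : Int), hfilter, List.map_append, List.prod_append]
    simp only [Int.toNat_natCast]
    rw [htake, hdrop]
    simp
  unfold Lagrange_value
  rw [PySem.List.foldl_add, List.map_congr_left hterm, PySem.List.pyRange_zero_nat, List.map_map]
  simp only [Function.comp_def, Int.toNat_natCast, zero_add]
  exact pvSum_eq_pvF m d hdlen.symm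

lemma Lagrange_value_alt_eq_pvF (m x : List Int) (k : Int) :
    Lagrange_value_alt m x k
      = pvF m ((PySem.List.pyRange 0 (m.length : Int) 1).map (fun j => k - PySem.List.pyGetD x j 0)) := by
  set f : Int → Int := fun j => k - PySem.List.pyGetD x j 0 with hf
  set d := (PySem.List.pyRange 0 (m.length : Int) 1).map f with hd
  cases m with
  | nil =>
    simp [Lagrange_value_alt, pvAltLoop, pvF]
  | cons m0 mt =>
    have hn : (0 : Int) < ((m0 :: mt).length : Int) := by
      simp
    have htail : (PySem.List.pyRange 1 ((m0 :: mt).length : Int) 1).map f = d.tail := by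
      rw [hd, PySem.List.pyRange_one_cons hn, List.map_cons, List.tail_cons]
      norm_num
    have hlast : (PySem.List.pyRange 0 (((m0 :: mt).length : Int) - 1) 1).map f = d.dropLast := by
      have hsucc : PySem.List.pyRange 0 ((m0 :: mt).length : Int) 1
          = PySem.List.pyRange 0 (((m0 :: mt).length : Int) - 1) 1 ++ [((m0 :: mt).length : Int) - 1] := by
        have := PySem.List.pyRange_one_succ_right (a := 0)
          (b := ((m0 :: mt).length : Int) - 1) (by simp)
        simpa using this
      rw [hd, hsucc, List.map_append, List.map_cons, List.map_nil, List.dropLast_concat]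
    have hlen : (m0 :: mt).length = d.length := by
      simp [hd, PySem.List.length_pyRange_one]
    show pvAltLoop (m0 :: mt)
        ((PySem.List.pyRange 0 (((m0 :: mt).length : Int) - 1) 1).map f)
        (pvSufProds ((PySem.List.pyRange 1 ((m0 :: mt).length : Int) 1).map f)) 1 0
      = pvF (m0 :: mt) d
    rw [htail, hlast, pvAltLoop_eq (m0 :: mt) d hlen 1 0]
    ring

-- ===== VERDICT (by name: the statement is the Claim_ definition above) =====
theorem Lagrange_value_spec : Claim_equal_Lagrange_value := by
  intro m x k _ _
  show Lagrange_value m x k = Lagrange_value_alt m x k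
  rw [Lagrange_value_eq_pvF, Lagrange_value_alt_eq_pvF]
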